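-- pv_equiv track=rewrite | github.com/VII-77/levqor-frontend | scripts/reconcile_stripe.py | reconcile
-- ===== SOURCE A (Python) =====
-- def reconcile(stripe_txns, local_txns):
--     """Compare Stripe and local transactions."""
--     stripe_ids = {txn.get("id") for txn in stripe_txns}
--     local_ids = {txn[0] for txn in local_txns}
--
--     missing_in_local = stripe_ids - local_ids
--     missing_in_stripe = local_ids - stripe_ids
--
--     return {
--         "stripe_count": len(stripe_txns),
--         "local_count": len(local_txns),
--         "missing_in_local": len(missing_in_local),
--         "missing_in_stripe": len(missing_in_stripe),
--         "matched": len(stripe_ids & local_ids)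
--     }
-- ===== SOURCE B (Python) =====
-- def reconcile(stripe_txns, local_txns):
--     """Compare Stripe and local transactions."""
--     # one presence table: id -> (seen in stripe, seen in local)
--     seen = {}
--     for txn in stripe_txns:
--         seen[txn.get("id")] = (True, False)
--     for txn in local_txns:
--         k = txn[0]
--         seen[k] = (seen.get(k, (False, False))[0], True)
--     matched = missing_in_local = missing_in_stripe = 0
--     for in_stripe, in_local in seen.values():
--         if in_stripe and in_local:
--             matched += 1
--         elif in_stripe:
--             missing_in_local += 1
--         else:
--             missing_in_stripe += 1
--     return {
--         "stripe_count": len(stripe_txns),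
--         "local_count": len(local_txns),
--         "missing_in_local": missing_in_local,
--         "missing_in_stripe": missing_in_stripe,
--         "matched": matched,
--     }
-- ===== Notes on version B (the rewrite author's own statement) =====
-- stated objective: alternative
-- what changed: Replaces the two sets and three set-algebra operations (difference twice, intersection) by a single dict mapping each id to an (in_stripe, in_local) presence pair filled in two passes, then one tally loop over its values that counts matched / stripe-only / local-only in one go.
import Mathlib
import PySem

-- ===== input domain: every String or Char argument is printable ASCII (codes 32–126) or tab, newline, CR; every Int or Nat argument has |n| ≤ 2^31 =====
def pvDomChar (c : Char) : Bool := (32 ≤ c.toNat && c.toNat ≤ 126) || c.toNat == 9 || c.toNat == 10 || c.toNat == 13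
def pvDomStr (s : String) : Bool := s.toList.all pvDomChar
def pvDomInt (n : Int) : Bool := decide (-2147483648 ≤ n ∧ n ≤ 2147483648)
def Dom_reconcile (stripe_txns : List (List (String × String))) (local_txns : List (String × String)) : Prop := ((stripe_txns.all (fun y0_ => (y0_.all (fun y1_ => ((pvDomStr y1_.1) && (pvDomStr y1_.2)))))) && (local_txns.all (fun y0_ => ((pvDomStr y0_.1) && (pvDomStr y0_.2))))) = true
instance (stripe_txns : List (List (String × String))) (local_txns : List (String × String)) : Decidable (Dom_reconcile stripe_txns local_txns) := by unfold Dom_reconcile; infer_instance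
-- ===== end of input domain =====

-- B replaces A's set algebra by one id -> (in_stripe, in_local) presence dict plus a single tally
-- loop (objective: alternative decomposition, same cost).


-- ===== PORT A =====
-- Python's stripe_ids may contain None (txn.get("id")), local_ids only strings; both sets are
-- modelled over Option String (local ids lifted with `some`, exact: None equals no string in Python).
def reconcile (stripe_txns : List (List (String × String))) (local_txns : List (String × String)) : List (String × Int) :=
  let stripe_ids : PySem.Set (Option String) :=
    PySem.Set.ofList (stripe_txns.map (fun t => (PySem.Dict.mk t).get? "id"))
  let local_ids : PySem.Set (Option String) :=
    PySem.Set.ofList (local_txns.map (fun t => some t.1))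
  let missing_in_local := PySem.Set.diff stripe_ids local_ids
  let missing_in_stripe := PySem.Set.diff local_ids stripe_ids
  [("stripe_count", (stripe_txns.length : Int)),
   ("local_count", (local_txns.length : Int)),
   ("missing_in_local", (missing_in_local.length : Int)),
   ("missing_in_stripe", (missing_in_stripe.length : Int)),
   ("matched", ((PySem.Set.inter stripe_ids local_ids).length : Int))]

-- ===== PORT B =====
def reconcile_alt (stripe_txns : List (List (String × String))) (local_txns : List (String × String)) : List (String × Int) :=
  let seen1 : PySem.Dict (Option String) (Bool × Bool) :=
    stripe_txns.foldl (fun d t => d.insert ((PySem.Dict.mk t).get? "id") (true, false)) PySem.Dict.empty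
  let seen : PySem.Dict (Option String) (Bool × Bool) :=
    local_txns.foldl (fun d t => d.insert (some t.1) ((d.getD (some t.1) (false, false)).1, true)) seen1
  let tally : Int × Int × Int :=
    seen.values.foldl (fun acc v =>
      if v.1 && v.2 then (acc.1 + 1, acc.2.1, acc.2.2)
      else if v.1 then (acc.1, acc.2.1 + 1, acc.2.2)
      else (acc.1, acc.2.1, acc.2.2 + 1)) (0, 0, 0)
  [("stripe_count", (stripe_txns.length : Int)),
   ("local_count", (local_txns.length : Int)),
   ("missing_in_local", tally.2.1),
   ("missing_in_stripe", tally.2.2),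
   ("matched", tally.1)]

-- ===== PRECONDITION & SPEC =====
def Spec_reconcile (stripe_txns : List (List (String × String))) (local_txns : List (String × String)) (out : List (String × Int)) : Prop := out = reconcile_alt stripe_txns local_txns
instance (stripe_txns : List (List (String × String))) (local_txns : List (String × String)) (out : List (String × Int)) : Decidable (Spec_reconcile stripe_txns local_txns out) := by unfold Spec_reconcile; infer_instance

-- ===== CLAIM (what is proved, stated in full; the proofs are below) =====
def Claim_equal_reconcile : Prop := ∀ (stripe_txns : List (List (String × String))) (local_txns : List (String × String)), Dom_reconcile stripe_txns local_txns → Spec_reconcile stripe_txns local_txns (reconcile stripe_txns local_txns)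

-- ===== LEMMAS AND PROOFS =====

-- two Nodup lists with the same members have the same length
theorem pv_len_eq_of_nodup_mem_iff {α : Type} [DecidableEq α] {X Y : List α}
    (hX : X.Nodup) (hY : Y.Nodup) (h : ∀ x, x ∈ X ↔ x ∈ Y) : X.length = Y.length :=
  ((List.perm_ext_iff_of_nodup hX hY).mpr h).length_eq

-- a fold inserting at a computed key is a fold over the key list
theorem pv_foldl_key {α κ ν : Type} [BEq κ] (l : List α) (f : α → κ)
    (g : PySem.Dict κ ν → κ → PySem.Dict κ ν) (d : PySem.Dict κ ν) :
    l.foldl (fun d t => g d (f t)) d = (l.map f).foldl g d :=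
  List.foldl_map.symm

-- after B's first loop, the stored pair at k is (k seen, false), on top of d
theorem pv_getD_loop1 {κ : Type} [BEq κ] [LawfulBEq κ]
    (l : List κ) (d : PySem.Dict κ (Bool × Bool)) (k : κ) :
    (l.foldl (fun d x => d.insert x (true, false)) d).getD k (false, false)
      = if k ∈ l then (true, false) else d.getD k (false, false) := by
  induction l generalizing d with
  | nil => simp
  | cons x l ih =>
      rw [List.foldl_cons, ih]
      by_cases h2 : k = x
      · subst h2
        by_cases h1 : k ∈ l <;>
          simp [h1, PySem.Dict.getD_insert_self]
      · rw [PySem.Dict.getD_insert_of_ne _ _ _ h2]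
        simp [List.mem_cons, h2]

-- B's second loop: the first component is preserved (a fixed predicate p),
-- the second becomes true exactly on the visited keys
theorem pv_getD_loop2 {κ : Type} [BEq κ] [LawfulBEq κ]
    (l : List κ) (d : PySem.Dict κ (Bool × Bool)) (p : κ → Bool)
    (hp : ∀ k, (d.getD k (false, false)).1 = p k) (k : κ) :
    (l.foldl (fun d x => d.insert x ((d.getD x (false, false)).1, true)) d).getD k (false, false)
      = (p k, if k ∈ l then true else (d.getD k (false, false)).2) := by
  induction l generalizing d with
  | nil => simp [← hp k]
  | cons x l ih =>
      rw [List.foldl_cons,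
        ih _ (fun k' => by
          by_cases h : k' = x
          · rw [h, PySem.Dict.getD_insert_self]; exact hp x
          · rw [PySem.Dict.getD_insert_of_ne _ _ _ h]; exact hp k')]
      by_cases h2 : k = x
      · subst h2
        rw [PySem.Dict.getD_insert_self]
        simp
      · rw [PySem.Dict.getD_insert_of_ne _ _ _ h2]
        simp [List.mem_cons, h2]

-- the tally loop counts the three buckets
theorem pv_tally (vs : List (Bool × Bool)) (a b c : Int) :
    vs.foldl (fun (acc : Int × Int × Int) v =>
      if v.1 && v.2 then (acc.1 + 1, acc.2.1, acc.2.2)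
      else if v.1 then (acc.1, acc.2.1 + 1, acc.2.2)
      else (acc.1, acc.2.1, acc.2.2 + 1)) (a, b, c)
    = (a + vs.countP (fun v => v.1 && v.2),
       b + vs.countP (fun v => v.1 && !v.2),
       c + vs.countP (fun v => !v.1)) := by
  induction vs generalizing a b c with
  | nil => simp
  | cons v vs ih =>
      rcases v with ⟨x, y⟩
      cases x <;> cases y <;>
        simp only [List.foldl_cons, List.countP_cons, ih] <;> simp <;> omega

-- the core: B's presence dict + tally computes A's three set cardinalities, over any key lists
theorem pv_counts {κ : Type} [DecidableEq κ] [BEq κ] [LawfulBEq κ] (sids lids : List κ) :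
    ((lids.foldl (fun d x => d.insert x ((d.getD x (false, false)).1, true))
        (sids.foldl (fun d x => d.insert x (true, false))
          (PySem.Dict.empty : PySem.Dict κ (Bool × Bool)))).values.foldl
      (fun (acc : Int × Int × Int) v =>
        if v.1 && v.2 then (acc.1 + 1, acc.2.1, acc.2.2)
        else if v.1 then (acc.1, acc.2.1 + 1, acc.2.2)
        else (acc.1, acc.2.1, acc.2.2 + 1)) (0, 0, 0))
    = ((((PySem.Set.ofList sids).inter (PySem.Set.ofList lids)).length : Int),
       (((PySem.Set.ofList sids).diff (PySem.Set.ofList lids)).length : Int),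
       (((PySem.Set.ofList lids).diff (PySem.Set.ofList sids)).length : Int)) := by
  set seen1 := sids.foldl (fun d x => d.insert x ((true : Bool), (false : Bool)))
    (PySem.Dict.empty : PySem.Dict κ (Bool × Bool)) with hseen1
  set seen := lids.foldl (fun d x => d.insert x ((d.getD x (false, false)).1, true)) seen1 with hseen
  have h1 : ∀ k, seen1.getD k (false, false)
      = if k ∈ sids then (true, false) else (false, false) := by
    intro k
    rw [hseen1, pv_getD_loop1, PySem.Dict.getD_empty]
  have h2 : ∀ k, seen.getD k (false, false) = (decide (k ∈ sids), decide (k ∈ lids)) := by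
    intro k
    rw [hseen, pv_getD_loop2 lids seen1 (fun k => decide (k ∈ sids))
      (fun k => by rw [h1 k]; split <;> simp_all), h1 k]
    by_cases hk : k ∈ lids <;> by_cases hk' : k ∈ sids <;> simp [hk, hk']
  have hkeys : seen.keys = PySem.Set.ofList (sids ++ lids) := by
    rw [hseen, PySem.Dict.keys_foldl_insert lids
          (fun d x => ((d.getD x (false, false)).1, true)),
        hseen1, PySem.Dict.keys_foldl_insert sids (fun _ _ => ((true : Bool), (false : Bool))),
        PySem.Dict.keys_empty, PySem.Set.update_nil_left, PySem.Set.ofList_append]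
  have hnd : seen.keys.Nodup := by rw [hkeys]; exact PySem.Set.nodup_ofList _
  have hvals : seen.values = seen.keys.map (fun k => (decide (k ∈ sids), decide (k ∈ lids))) := by
    rw [PySem.Dict.values_eq_map_keys seen hnd (false, false)]
    exact List.map_congr_left (fun k _ => h2 k)
  have count : ∀ (q : κ → Bool) (X : List κ), X.Nodup →
      (∀ x, x ∈ X ↔ (x ∈ sids ∨ x ∈ lids) ∧ q x) →
      (seen.keys.countP q : Int) = (X.length : Int) := by
    intro q X hX hmem
    symm
    congr 1
    rw [List.countP_eq_length_filter]
    refine pv_len_eq_of_nodup_mem_iff hX (List.Nodup.filter _ hnd) ?_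
    intro x
    rw [List.mem_filter, hkeys, PySem.Set.mem_ofList, List.mem_append, hmem]
  rw [hvals, pv_tally]
  simp only [List.countP_map, zero_add]
  refine Prod.ext ?_ (Prod.ext ?_ ?_) <;> simp only []
  · refine count _ _
      (PySem.Set.nodup_inter _ _ (PySem.Set.nodup_ofList _)) ?_
    intro x
    rw [PySem.Set.mem_inter, PySem.Set.mem_ofList, PySem.Set.mem_ofList]
    constructor
    · rintro ⟨h, h'⟩; exact ⟨Or.inl h, by simp [Function.comp, h, h']⟩
    · rintro ⟨_, h⟩; simp [Function.comp] at h; exact ⟨h.1, h.2⟩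
  · refine count _ _
      (PySem.Set.nodup_diff _ _ (PySem.Set.nodup_ofList _)) ?_
    intro x
    rw [PySem.Set.mem_diff, PySem.Set.mem_ofList, PySem.Set.mem_ofList]
    constructor
    · rintro ⟨h, h'⟩; exact ⟨Or.inl h, by simp [Function.comp, h, h']⟩
    · rintro ⟨_, h⟩; simp [Function.comp] at h; exact ⟨h.1, h.2⟩
  · refine count _ _
      (PySem.Set.nodup_diff _ _ (PySem.Set.nodup_ofList _)) ?_
    intro x
    rw [PySem.Set.mem_diff, PySem.Set.mem_ofList, PySem.Set.mem_ofList]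
    constructor
    · rintro ⟨h, h'⟩; exact ⟨Or.inr h, by simp [Function.comp, h']⟩
    · rintro ⟨hm, h⟩; simp [Function.comp] at h; exact ⟨hm.resolve_left h, h⟩

theorem reconcile_spec_aux (stripe_txns : List (List (String × String)))
    (local_txns : List (String × String)) :
    reconcile stripe_txns local_txns = reconcile_alt stripe_txns local_txns := by
  simp only [reconcile, reconcile_alt]
  rw [pv_foldl_key stripe_txns (fun t => (PySem.Dict.mk t).get? "id")
        (fun d k => d.insert k (true, false)),
      pv_foldl_key local_txns (fun t => some t.1)
        (fun d k => d.insert k ((d.getD k (false, false)).1, true)),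
      pv_counts]

-- ===== VERDICT (by name: the statement is the Claim_ definition above) =====
theorem reconcile_spec : Claim_equal_reconcile := by
  intro stripe_txns local_txns _
  exact reconcile_spec_aux stripe_txns local_txns
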